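-- pv_equiv track=rewrite | github.com/kimata/dupdel | src/dupdel/core.py | _find_digit_group_in_range
-- ===== SOURCE A (Python) =====
-- def _find_digit_group_in_range(name: str, start: int, end: int) -> tuple[int, int] | None:
--     """指定範囲内の数字を含む数字グループを見つける"""
--     # 範囲内で最初の数字を見つける
--     digit_pos = -1
--     for i in range(start, end):
--         if i < len(name) and name[i].isdigit():
--             digit_pos = i
--             break
--
--     if digit_pos == -1:
--         return None
--
--     # その位置から数字グループを拡張
--     group_start = digit_pos
--     group_end = digit_pos + 1
--
--     while group_start > 0 and name[group_start - 1].isdigit():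
--         group_start -= 1
--     while group_end < len(name) and name[group_end].isdigit():
--         group_end += 1
--
--     return group_start, group_end
-- ===== SOURCE B (Python) =====
-- def _find_digit_group_in_range(name: str, start: int, end: int) -> tuple[int, int] | None:
--     """Enumerate the maximal digit runs of `name` once, then return the first
--     run whose span intersects the query range [start, end)."""
--     n = len(name)
--     runs = []
--     i = 0
--     while i < n:
--         if name[i].isdigit():
--             j = i
--             while j < n and name[j].isdigit():
--                 j += 1
--             runs.append((i, j))
--             i = j
--         else:
--             i += 1
--     for a, b in runs:
--         if max(a, start) < min(b, end):
--             return (a, b)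
--     return None
-- ===== Notes on version B (the rewrite author's own statement) =====
-- stated objective: alternative
-- what changed: Replaces the scan-for-first-digit-then-expand-both-directions logic by one left-to-right pass that precomputes all maximal digit runs and then returns the first run whose span intersects [start,end).
-- intended difference: For negative start with a digit among the wrapped-around scanned positions, A applies Python negative indexing and returns a negative-coordinate span such as (-2,-1) (or None via its -1 sentinel collision), while B returns the first maximal digit run overlapping [start,end) in normal coordinates (or None), which is the intended behaviour. — e.g. on _find_digit_group_in_range("1a", -2, 1): A returns some (-2, -1), B returns some (0, 1)
import Mathlib
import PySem

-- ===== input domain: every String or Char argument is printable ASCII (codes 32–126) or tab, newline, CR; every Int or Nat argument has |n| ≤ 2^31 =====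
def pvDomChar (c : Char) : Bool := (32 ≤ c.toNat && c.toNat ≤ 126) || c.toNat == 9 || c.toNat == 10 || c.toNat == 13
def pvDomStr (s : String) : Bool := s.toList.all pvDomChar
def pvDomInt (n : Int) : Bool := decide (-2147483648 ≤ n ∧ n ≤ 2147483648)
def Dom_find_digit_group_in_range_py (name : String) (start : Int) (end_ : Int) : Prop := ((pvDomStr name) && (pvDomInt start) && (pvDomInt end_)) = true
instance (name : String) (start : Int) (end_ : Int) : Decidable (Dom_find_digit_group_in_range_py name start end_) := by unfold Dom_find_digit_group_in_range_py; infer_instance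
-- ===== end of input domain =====

-- B replaces A's find-first-digit-then-expand-both-ways logic by one pass that collects all
-- maximal digit runs and selects the first run intersecting [start, end) (alternative
-- decomposition); return values agree outside D_, which covers A's negative-index
-- wraparound quirk for negative start.

-- ===== PORT A =====
-- name[i].isdigit() at a Python index i (possibly negative; false where Python would raise,
-- which Pre_ rules out on every access A performs)
def pvDgI (cs : List Char) (i : Int) : Bool :=
  match PySem.List.pyGet? cs i with
  | some c => c.isDigit
  | none => false

-- 'for i in range(start, end): if i < len(name) and name[i].isdigit(): digit_pos = i; break'
def pvFirstDigitA (cs : List Char) (i : Int) (e : Int) : Int :=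
  if h : i < e then
    if (i < (cs.length : Int) ∧ pvDgI cs i = true) then i
    else pvFirstDigitA cs (i + 1) e
  else -1
termination_by (e - i).toNat
decreasing_by omega

-- 'while group_start > 0 and name[group_start - 1].isdigit(): group_start -= 1'
def pvExpandDown (cs : List Char) (g : Int) : Int :=
  if h : (0 < g ∧ pvDgI cs (g - 1) = true) then pvExpandDown cs (g - 1)
  else g
termination_by g.toNat
decreasing_by omega

-- 'while group_end < len(name) and name[group_end].isdigit(): group_end += 1'
def pvExpandUp (cs : List Char) (g : Int) : Int :=
  if h : (g < (cs.length : Int) ∧ pvDgI cs g = true) then pvExpandUp cs (g + 1)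
  else g
termination_by ((cs.length : Int) - g).toNat
decreasing_by omega

def find_digit_group_in_range_py (name : String) (start : Int) (end_ : Int) : Option (Int × Int) :=
  let cs := name.toList
  let digitPos := pvFirstDigitA cs start end_
  if digitPos = -1 then none
  else some (pvExpandDown cs digitPos, pvExpandUp cs (digitPos + 1))

-- ===== PORT B =====
-- name[j].isdigit() at a nonnegative index j (false past the end)
def pvDg (cs : List Char) (j : Nat) : Bool :=
  match cs[j]? with
  | some c => c.isDigit
  | none => false

-- 'while j < n and name[j].isdigit(): j += 1'
def pvScanEnd (cs : List Char) (j : Nat) : Nat :=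
  if h : (j < cs.length ∧ pvDg cs j = true) then pvScanEnd cs (j + 1)
  else j
termination_by cs.length - j
decreasing_by omega

-- termination facts for B's outer while loop (cited by pvRunsFrom's decreasing_by)
theorem pvScanEnd_ge (cs : List Char) (j : Nat) : j ≤ pvScanEnd cs j := by
  fun_induction pvScanEnd <;> omega

theorem pvScanEnd_gt (cs : List Char) (i : Nat) (h1 : i < cs.length) (h2 : pvDg cs i = true) :
    i < pvScanEnd cs i := by
  rw [pvScanEnd]
  simp only [h1, h2, and_self, dite_true]
  have := pvScanEnd_ge cs (i + 1)
  omega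

-- B's outer 'while i < n' loop, producing the list 'runs'
def pvRunsFrom (cs : List Char) (i : Nat) : List (Int × Int) :=
  if h : i < cs.length then
    if hd : pvDg cs i = true then
      ((i : Int), (pvScanEnd cs i : Int)) :: pvRunsFrom cs (pvScanEnd cs i)
    else pvRunsFrom cs (i + 1)
  else []
termination_by cs.length - i
decreasing_by
  · have := pvScanEnd_gt cs i h hd; omega
  · omega

def find_digit_group_in_range_py_alt (name : String) (start : Int) (end_ : Int) : Option (Int × Int) :=
  (pvRunsFrom name.toList 0).find? (fun r => decide (max r.1 start < min r.2 end_))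

-- ===== PRECONDITION & SPEC =====
-- Pre_ excludes exactly the inputs where A raises IndexError: start < -len(name) with a
-- nonempty range(start, end) (A's first wrapped access name[start] is out of range).
def Pre_find_digit_group_in_range_py (name : String) (start : Int) (end_ : Int) : Prop :=
  start < end_ → -(name.toList.length : Int) ≤ start
instance (name : String) (start : Int) (end_ : Int) : Decidable (Pre_find_digit_group_in_range_py name start end_) := by unfold Pre_find_digit_group_in_range_py; infer_instance

def pvWitness_find_digit_group_in_range_py : String × Int × Int := ("a1b", 0, 3)

-- For negative start with a digit among the wrapped-around scanned positions (excluding the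
-- corner where that digit can only be the last character and no digit precedes end, on which
-- both return None), A applies Python negative indexing and returns a negative-coordinate span
-- such as (-2,-1) (or None via its -1 sentinel collision), while B returns the first maximal
-- digit run overlapping [start,end) in normal coordinates (or None), the intended behaviour.
def D_find_digit_group_in_range_py (name : String) (start : Int) (end_ : Int) : Prop :=
  start < 0 ∧ ∃ j : Fin name.toList.length,
    ((name.toList.length : Int) + start ≤ (j : Int) ∧
     (j : Int) < (name.toList.length : Int) + min end_ 0 ∧
     (name.toList[(j : Nat)]'j.isLt).isDigit = true) ∧
    ((j : Int) < (name.toList.length : Int) - 1 ∨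
     ∃ k : Fin name.toList.length, (k : Int) < end_ ∧ (name.toList[(k : Nat)]'k.isLt).isDigit = true)
instance (name : String) (start : Int) (end_ : Int) : Decidable (D_find_digit_group_in_range_py name start end_) := by unfold D_find_digit_group_in_range_py; infer_instance

def Spec_find_digit_group_in_range_py (name : String) (start : Int) (end_ : Int) (out : Option (Int × Int)) : Prop := ¬ D_find_digit_group_in_range_py name start end_ → out = find_digit_group_in_range_py_alt name start end_
instance (name : String) (start : Int) (end_ : Int) (out : Option (Int × Int)) : Decidable (Spec_find_digit_group_in_range_py name start end_ out) := by unfold Spec_find_digit_group_in_range_py; infer_instance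

def pvDiffWitness_find_digit_group_in_range_py : String × Int × Int := ("1a", -2, 1)
def pvDiffWitnessOut_find_digit_group_in_range_py : (Option (Int × Int)) × (Option (Int × Int)) :=
  (some (-2, -1), some (0, 1))

-- ===== CLAIM (what is proved, stated in full; the proofs are below) =====
def Claim_unchanged_find_digit_group_in_range_py : Prop := ∀ (name : String) (start : Int) (end_ : Int), Dom_find_digit_group_in_range_py name start end_ → Pre_find_digit_group_in_range_py name start end_ → Spec_find_digit_group_in_range_py name start end_ (find_digit_group_in_range_py name start end_)

def Claim_changed_find_digit_group_in_range_py : Prop := Dom_find_digit_group_in_range_py (pvDiffWitness_find_digit_group_in_range_py.1) (pvDiffWitness_find_digit_group_in_range_py.2.1) (pvDiffWitness_find_digit_group_in_range_py.2.2) ∧ Pre_find_digit_group_in_range_py (pvDiffWitness_find_digit_group_in_range_py.1) (pvDiffWitness_find_digit_group_in_range_py.2.1) (pvDiffWitness_find_digit_group_in_range_py.2.2) ∧ D_find_digit_group_in_range_py (pvDiffWitness_find_digit_group_in_range_py.1) (pvDiffWitness_find_digit_group_in_range_py.2.1) (pvDiffWitness_find_digit_group_in_range_py.2.2) ∧ find_digit_group_in_range_py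 (pvDiffWitness_find_digit_group_in_range_py.1) (pvDiffWitness_find_digit_group_in_range_py.2.1) (pvDiffWitness_find_digit_group_in_range_py.2.2) = pvDiffWitnessOut_find_digit_group_in_range_py.1 ∧ find_digit_group_in_range_py_alt (pvDiffWitness_find_digit_group_in_range_py.1) (pvDiffWitness_find_digit_group_in_range_py.2.1) (pvDiffWitness_find_digit_group_in_range_py.2.2) = pvDiffWitnessOut_find_digit_group_in_range_py.2 ∧ pvDiffWitnessOut_find_digit_group_in_range_py.1 ≠ pvDiffWitnessOut_find_digit_group_in_range_py.2

def Claim_exact_find_digit_group_in_range_py : Prop := ∀ (name : String) (start : Int) (end_ : Int), Dom_find_digit_group_in_range_py name start end_ → Pre_find_digit_group_in_range_py name start end_ → D_find_digit_group_in_range_py name start end_ → find_digit_group_in_range_py name start end_ ≠ find_digit_group_in_range_py_alt name start end_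

-- ===== LEMMAS AND PROOFS =====

-- the least digit position of cs in [i, e) — the specification both searches meet
def pvFD (cs : List Char) (e : Int) (i : Nat) : Option Nat :=
  if h : (i < cs.length ∧ (i : Int) < e) then
    (if pvDg cs i = true then some i else pvFD cs e (i + 1))
  else none
termination_by cs.length - i
decreasing_by omega

theorem pvDgI_natCast (cs : List Char) (j : Nat) : pvDgI cs (j : Int) = pvDg cs j := by
  simp [pvDgI, pvDg, PySem.List.pyGet?_natCast]

theorem pvFirstDigitA_of_ge (cs : List Char) (e : Int) (i : Int) (hi : (cs.length : Int) ≤ i) :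
    pvFirstDigitA cs i e = -1 := by
  fun_induction pvFirstDigitA cs i e with
  | case1 i h hc => omega
  | case2 i h hc ih => exact ih (by omega)
  | case3 i h => rfl

theorem pvFirstDigitA_eq_pvFD (cs : List Char) (e : Int) (i : Nat) :
    pvFirstDigitA cs (i : Int) e = (pvFD cs e i).elim (-1) (fun p => (p : Int)) := by
  fun_induction pvFD cs e i with
  | case1 i h hd =>
      rw [pvFirstDigitA]
      simp [pvDgI_natCast, hd, h.2]
      omega
  | case2 i h hd ih =>
      rw [pvFirstDigitA]
      simp only [h.2, dite_true]
      rw [if_neg (by simp [pvDgI_natCast, hd])]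
      rw [show (i : Int) + 1 = ((i + 1 : Nat) : Int) by push_cast; ring]
      exact ih
  | case3 i h =>
      by_cases he : (i : Int) < e
      · simp only [Option.elim]
        rw [pvFirstDigitA_of_ge cs e _ (by omega)]
      · rw [pvFirstDigitA]
        simp [he]

theorem pvFirstDigitA_neg (cs : List Char) (e : Int) :
    ∀ (i : Int), -(cs.length : Int) ≤ i → i < 0 →
    (∀ j : Nat, (cs.length : Int) + i ≤ (j : Int) → (j : Int) < (cs.length : Int) + min e 0 →
      pvDg cs j = false) →
    pvFirstDigitA cs i e = pvFirstDigitA cs 0 e := by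
  intro i h1 h2 hw
  obtain ⟨k, hk⟩ : ∃ k : Nat, i = -(k : Int) := ⟨(-i).toNat, by omega⟩
  subst hk
  clear h2
  induction k with
  | zero => norm_num
  | succ k ih =>
      by_cases he : -((k + 1 : Nat) : Int) < e
      · rw [pvFirstDigitA]
        have hkl : k + 1 ≤ cs.length := by omega
        have hdg : pvDgI cs (-((k + 1 : Nat) : Int)) = pvDg cs (cs.length - (k + 1)) := by
          unfold pvDgI pvDg
          rw [PySem.List.pyGet?_neg_natCast cs (k + 1) (by omega) hkl]
        have hfalse : pvDg cs (cs.length - (k + 1)) = false := by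
          apply hw
          · omega
          · push_cast at he; omega
        rw [dif_pos he, if_neg (fun hc => by
          rw [hdg, hfalse] at hc; exact absurd hc.2 (by simp))]
        have hstep : -((k + 1 : Nat) : Int) + 1 = -(k : Int) := by push_cast; ring
        rw [hstep]
        rcases Nat.eq_zero_or_pos k with hk0 | hkpos
        · subst hk0; norm_num
        · exact ih (by omega)
            (fun j hj1 hj2 => hw j (by omega) hj2)
      · rw [pvFirstDigitA, dif_neg he, pvFirstDigitA]
        have h0 : ¬ ((0:Int) < e) := by omega
        rw [dif_neg h0]

theorem pvScanEnd_le (cs : List Char) (j : Nat) (h : j ≤ cs.length) : pvScanEnd cs j ≤ cs.length := by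
  fun_induction pvScanEnd <;> omega

theorem pvScanEnd_digits (cs : List Char) (j : Nat) :
    ∀ k, j ≤ k → k < pvScanEnd cs j → pvDg cs k = true := by
  fun_induction pvScanEnd with
  | case1 j h ih =>
      intro k hk1 hk2
      rcases Nat.eq_or_lt_of_le hk1 with rfl | hlt
      · exact h.2
      · exact ih k hlt hk2
  | case2 j h => intro k hk1 hk2; omega

theorem pvScanEnd_stop (cs : List Char) (j : Nat) :
    ¬(pvScanEnd cs j < cs.length ∧ pvDg cs (pvScanEnd cs j) = true) := by
  fun_induction pvScanEnd with
  | case1 j h ih => exact ih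
  | case2 j h => exact h

theorem pvDg_false_of_ge (cs : List Char) (j : Nat) (h : cs.length ≤ j) : pvDg cs j = false := by
  simp [pvDg, List.getElem?_eq_none h]

theorem pvExpandDown_eq (cs : List Char) (a : Nat)
    (hstop : a = 0 ∨ pvDg cs (a - 1) = false) :
    ∀ (d : Nat), (∀ k, a ≤ k → k ≤ a + d → pvDg cs k = true) →
    pvExpandDown cs ((a + d : Nat) : Int) = (a : Int) := by
  intro d
  induction d with
  | zero =>
      intro _
      rw [pvExpandDown]
      rcases hstop with rfl | hf
      · norm_num
      · rw [dif_neg]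
        · norm_num
        · rintro ⟨hpos, hdg⟩
          have ha : 0 < a := by omega
          rw [show ((a + 0 : Nat) : Int) - 1 = ((a - 1 : Nat) : Int) by push_cast [ha]; omega,
            pvDgI_natCast, hf] at hdg
          simp at hdg
  | succ d ih =>
      intro hall
      rw [pvExpandDown, dif_pos, show ((a + (d+1) : Nat) : Int) - 1 = ((a + d : Nat) : Int) by push_cast; ring]
      · exact ih (fun k h1 h2 => hall k h1 (by omega))
      constructor
      · omega
      · rw [show ((a + (d+1) : Nat) : Int) - 1 = ((a + d : Nat) : Int) by push_cast; ring,
          pvDgI_natCast]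
        exact hall (a + d) (by omega) (by omega)

theorem pvExpandUp_eq (cs : List Char) (t : Nat) (ht : t ≤ cs.length)
    (hstop : ¬(t < cs.length ∧ pvDg cs t = true)) :
    ∀ (d : Nat) (j : Nat), j + d = t → (∀ k, j ≤ k → k < t → pvDg cs k = true) →
    pvExpandUp cs ((j : Nat) : Int) = (t : Int) := by
  intro d
  induction d with
  | zero =>
      intro j hj _
      have hjt : j = t := by omega
      subst hjt
      rw [pvExpandUp, dif_neg]
      rintro ⟨h1, h2⟩
      rw [pvDgI_natCast] at h2
      exact hstop ⟨by omega, h2⟩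
  | succ d ih =>
      intro j hj hall
      rw [pvExpandUp, dif_pos, show ((j : Nat) : Int) + 1 = ((j + 1 : Nat) : Int) by push_cast; ring]
      · exact ih (j + 1) (by omega) (fun k h1 h2 => hall k (by omega) h2)
      constructor
      · omega
      · rw [pvDgI_natCast]; exact hall j (by omega) (by omega)

theorem pvFD_none_of_ge_e (cs : List Char) (e : Int) (i : Nat) (h : e ≤ (i : Int)) :
    pvFD cs e i = none := by
  rw [pvFD, dif_neg]; omega

theorem pvFD_none_of_ge_len (cs : List Char) (e : Int) (i : Nat) (h : cs.length ≤ i) :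
    pvFD cs e i = none := by
  rw [pvFD, dif_neg]; omega

theorem pvCastMax (i : Nat) (start : Int) :
    ((max i start.toNat : Nat) : Int) = max (i : Int) start := by omega

theorem pvFD_step (cs : List Char) (e : Int) (i : Nat) (hin : i < cs.length)
    (hdg : pvDg cs i = false) (hie : (i : Int) < e) : pvFD cs e i = pvFD cs e (i + 1) := by
  rw [pvFD, dif_pos ⟨hin, hie⟩, if_neg (by simp [hdg])]

-- the main bridge: B's run search computes A's expanded group around the least digit in range
theorem pvRuns_find (cs : List Char) (start e : Int) :
    ∀ (d i : Nat), cs.length - i ≤ d →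
    (pvDg cs i = true → (i = 0 ∨ pvDg cs (i - 1) = false)) →
    (pvRunsFrom cs i).find? (fun r => decide (max r.1 start < min r.2 e)) =
      (pvFD cs e (max i start.toNat)).elim none
        (fun p => some (pvExpandDown cs (p : Int), pvExpandUp cs ((p : Int) + 1))) := by
  intro d
  induction d with
  | zero =>
      intro i hd _
      rw [pvRunsFrom, dif_neg (by omega), pvFD_none_of_ge_len cs e _ (by omega)]
      rfl
  | succ d ih =>
      intro i hdle hpre
      by_cases hin : i < cs.length
      · by_cases hdg : pvDg cs i = true
        · -- run head at i, extent t
          set t := pvScanEnd cs i with ht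
          have hti : i < t := pvScanEnd_gt cs i hin hdg
          have htle : t ≤ cs.length := pvScanEnd_le cs i (by omega)
          have hdigits : ∀ k, i ≤ k → k < t → pvDg cs k = true := pvScanEnd_digits cs i
          have hstop : ¬(t < cs.length ∧ pvDg cs t = true) := pvScanEnd_stop cs i
          rw [pvRunsFrom, dif_pos hin, dif_pos hdg]
          set m := max i start.toNat with hm
          have hmi : i ≤ m := by omega
          by_cases hcase : m < t ∧ (m : Int) < e
          · -- the head run is the answer
            have hdgm : pvDg cs m = true := hdigits m hmi hcase.1
            have hFD : pvFD cs e m = some m := by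
              rw [pvFD, dif_pos ⟨by omega, hcase.2⟩, if_pos hdgm]
            rw [hFD]
            have hpred : (max ((i : Nat) : Int) start < min ((t : Nat) : Int) e) := by
              omega
            rw [List.find?_cons_of_pos (by simpa using hpred)]
            have hED : pvExpandDown cs ((m : Nat) : Int) = (i : Int) := by
              have := pvExpandDown_eq cs i (hpre hdg) (m - i)
                (fun k h1 h2 => hdigits k h1 (by omega))
              rwa [show i + (m - i) = m by omega] at this
            have hEU : pvExpandUp cs (((m : Nat) : Int) + 1) = (t : Int) := by
              have := pvExpandUp_eq cs t htle hstop (t - (m + 1)) (m + 1) (by omega)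
                (fun k h1 h2 => hdigits k (by omega) h2)
              rwa [show ((m + 1 : Nat) : Int) = ((m : Nat) : Int) + 1 by push_cast; ring] at this
            simp only [Option.elim, hED, hEU]
            rw [← ht]
          · -- the head run is not selected
            have hpredF : ¬ (max ((i : Nat) : Int) start < min ((t : Nat) : Int) e) := by
              omega
            rw [List.find?_cons_of_neg (by simpa using hpredF)]
            have hdgt : pvDg cs t = true → t = 0 ∨ pvDg cs (t - 1) = false := by
              intro h
              rcases Nat.lt_or_ge t cs.length with h1 | h1
              · exact absurd ⟨h1, h⟩ hstop
              · rw [pvDg_false_of_ge cs t h1] at h; simp at h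
            rw [ih t (by omega) hdgt]
            congr 1
            rcases Nat.lt_or_ge m t with hmt | hmt
            · -- then e ≤ m; both sides have no digit in range
              have hem : e ≤ (m : Int) := by omega
              rw [pvFD_none_of_ge_e cs e m hem, pvFD_none_of_ge_e cs e _ ?_]
              have : (i : Int) ≥ e ∨ (start.toNat : Int) ≥ e := by
                have := pvCastMax i start; omega
              rcases this with h | h
              · have : (t : Int) ≥ e := by omega
                omega
              · omega
            · -- m ≥ t > i forces m = start.toNat = max t start.toNat
              have : max t start.toNat = m := by omega
              rw [this]
        · -- no digit at i: both sides step to i + 1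
          rw [pvRunsFrom, dif_pos hin, dif_neg hdg]
          rw [ih (i + 1) (by omega) (fun h => Or.inr (by simpa using hdg))]
          congr 1
          rcases Nat.lt_or_ge i start.toNat with hlt | hge
          · rw [show max i start.toNat = max (i + 1) start.toNat by omega]
          · rw [show max i start.toNat = i by omega, show max (i + 1) start.toNat = i + 1 by omega]
            by_cases hie : (i : Int) < e
            · rw [pvFD_step cs e i hin (by simpa using hdg) hie]
            · rw [pvFD_none_of_ge_e cs e i (by omega), pvFD_none_of_ge_e cs e (i + 1) (by omega)]
      · rw [pvRunsFrom, dif_neg hin, pvFD_none_of_ge_len cs e _ (by omega)]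
        rfl

theorem pvDg_getElem (cs : List Char) (j : Nat) (h : j < cs.length) :
    pvDg cs j = (cs[j]'h).isDigit := by
  simp [pvDg, List.getElem?_eq_getElem h]

-- full characterization of A's scan when the wrapped-around segment contains a digit:
-- it stops at the least digit position jh of the window and returns jh - len
theorem pvFirstDigitA_neg_hit (cs : List Char) (e : Int) :
    ∀ (i : Int), -(cs.length : Int) ≤ i → i < 0 →
    (∃ j : Nat, (cs.length : Int) + i ≤ (j : Int) ∧ (j : Int) < (cs.length : Int) + min e 0 ∧
      pvDg cs j = true) →
    ∃ jh : Nat, pvFirstDigitA cs i e = (jh : Int) - (cs.length : Int) ∧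
      (cs.length : Int) + i ≤ (jh : Int) ∧ (jh : Int) < (cs.length : Int) + min e 0 ∧
      pvDg cs jh = true ∧
      (∀ j : Nat, (cs.length : Int) + i ≤ (j : Int) → (j : Int) < (cs.length : Int) + min e 0 →
        pvDg cs j = true → jh ≤ j) := by
  intro i h1 h2 hex
  obtain ⟨k, hk⟩ : ∃ k : Nat, i = -(k : Int) := ⟨(-i).toNat, by omega⟩
  subst hk
  clear h2
  induction k with
  | zero =>
      obtain ⟨j, hj1, hj2, hj3⟩ := hex
      exact absurd hj2 (by omega)
  | succ k ih =>
      obtain ⟨j, hj1, hj2, hj3⟩ := hex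
      have he : -((k + 1 : Nat) : Int) < e := by omega
      have hkl : k + 1 ≤ cs.length := by omega
      have hdg : pvDgI cs (-((k + 1 : Nat) : Int)) = pvDg cs (cs.length - (k + 1)) := by
        unfold pvDgI pvDg
        rw [PySem.List.pyGet?_neg_natCast cs (k + 1) (by omega) hkl]
      by_cases hd : pvDg cs (cs.length - (k + 1)) = true
      · refine ⟨cs.length - (k + 1), ?_, by omega, by omega, hd, fun j' hj' _ _ => by omega⟩
        rw [pvFirstDigitA, dif_pos he,
          if_pos ⟨by omega, by rw [hdg]; exact hd⟩]
        omega
      · have hjne : j ≠ cs.length - (k + 1) := by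
          intro hh; rw [hh] at hj3; exact hd hj3
        rcases Nat.eq_zero_or_pos k with hk0 | hkpos
        · exfalso; apply hd
          have : j = cs.length - (k + 1) := by omega
          rw [← this]; exact hj3
        · rw [pvFirstDigitA, dif_pos he, if_neg (fun hc => by
            rw [hdg] at hc
            exact hd hc.2)]
          rw [show -((k + 1 : Nat) : Int) + 1 = -((k : Nat) : Int) by push_cast; ring]
          obtain ⟨jh, hv, hb1, hb2, hb3, hmin⟩ := ih (by omega)
            ⟨j, by omega, hj2, hj3⟩
          refine ⟨jh, hv, by omega, hb2, hb3, ?_⟩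
          intro j' hj'1 hj'2 hj'3
          have : j' ≠ cs.length - (k + 1) := by
            intro hh; rw [hh] at hj'3; exact hd hj'3
          exact hmin j' (by omega) hj'2 hj'3

theorem pvFD_isSome_of (cs : List Char) (e : Int) :
    ∀ i : Nat, (∃ k : Nat, i ≤ k ∧ k < cs.length ∧ (k : Int) < e ∧ pvDg cs k = true) →
    (pvFD cs e i).isSome = true := by
  intro i
  fun_induction pvFD cs e i with
  | case1 i h hd => intro _; rfl
  | case2 i h hd ih =>
      rintro ⟨k, hk1, hk2, hk3, hk4⟩
      have : k ≠ i := fun hh => by rw [hh] at hk4; simp [hd] at hk4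
      exact ih ⟨k, by omega, hk2, hk3, hk4⟩
  | case3 i h =>
      rintro ⟨k, hk1, hk2, hk3, hk4⟩
      exfalso
      rcases not_and_or.mp h with h' | h' <;> omega

theorem pvFD_none_of (cs : List Char) (e : Int) :
    ∀ i : Nat, (∀ k : Nat, k < cs.length → (k : Int) < e → pvDg cs k = false) →
    pvFD cs e i = none := by
  intro i
  fun_induction pvFD cs e i with
  | case1 i h hd => intro hall; rw [hall i h.1 h.2] at hd; simp at hd
  | case2 i h hd ih => exact ih
  | case3 i h => intro _; rfl

theorem pvRunsFrom_fst_nonneg (cs : List Char) (i : Nat) :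
    ∀ r, r ∈ pvRunsFrom cs i → 0 ≤ r.1 := by
  fun_induction pvRunsFrom cs i with
  | case1 i h hd ih =>
      intro r hr
      rcases List.mem_cons.mp hr with rfl | hr
      · simp
      · exact ih r hr
  | case2 i h hd ih => exact ih
  | case3 i h => intro r hr; simp at hr

theorem pv_main (name : String) (start e : Int)
    (hpre : Pre_find_digit_group_in_range_py name start e)
    (hnd : ¬ D_find_digit_group_in_range_py name start e) :
    find_digit_group_in_range_py name start e = find_digit_group_in_range_py_alt name start e := by
  simp only [find_digit_group_in_range_py, find_digit_group_in_range_py_alt]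
  set cs := name.toList with hcs
  have hB := pvRuns_find cs start e cs.length 0 (by omega) (fun _ => Or.inl rfl)
  rw [show max 0 start.toNat = start.toNat by omega] at hB
  rw [hB]
  by_cases hs : 0 ≤ start
  · have hA := pvFirstDigitA_eq_pvFD cs e start.toNat
    rw [show ((start.toNat : Nat) : Int) = start from Int.toNat_of_nonneg hs] at hA
    rw [hA]
    cases hfd : pvFD cs e start.toNat with
    | none => simp
    | some p =>
        simp only [Option.elim]
        rw [if_neg (by omega)]
  · have hs : start < 0 := by omega
    have hz : start.toNat = 0 := by omega
    rw [hz]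
    by_cases hse : start < e
    · have hlen := hpre hse
      by_cases hwd : ∃ j : Nat, (cs.length : Int) + start ≤ (j : Int) ∧
          (j : Int) < (cs.length : Int) + min e 0 ∧ pvDg cs j = true
      · -- a wrapped-window digit exists; since ¬D_, it is the last character only and
        -- no digit precedes end, so both sides return none
        obtain ⟨jh, hv, hh1, hh2, hh3, _⟩ := pvFirstDigitA_neg_hit cs e start hlen hs hwd
        have hjl : jh < cs.length := by omega
        have hno : ¬ ((jh : Int) < (cs.length : Int) - 1 ∨
            ∃ k : Fin cs.length, (k : Int) < e ∧ (cs[(k : Nat)]'k.isLt).isDigit = true) := by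
          intro hdisj
          exact hnd ⟨hs, ⟨⟨jh, hjl⟩, ⟨hh1, hh2, by rw [← pvDg_getElem cs jh hjl]; exact hh3⟩, hdisj⟩⟩
        push Not at hno
        have hCk : ∀ k : Nat, k < cs.length → (k : Int) < e → pvDg cs k = false := by
          intro k h1 h2
          have := hno.2 ⟨k, h1⟩
          rw [pvDg_getElem cs k h1]
          simpa [h2] using this
        rw [hv, if_pos (by omega), pvFD_none_of cs e 0 hCk]
        rfl
      · push Not at hwd
        have hw : ∀ j : Nat, (cs.length : Int) + start ≤ (j : Int) →
            (j : Int) < (cs.length : Int) + min e 0 → pvDg cs j = false := by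
          intro j h1 h2
          have := hwd j h1 h2
          simpa using this
        rw [pvFirstDigitA_neg cs e start hlen hs hw]
        have hA := pvFirstDigitA_eq_pvFD cs e 0
        rw [show ((0 : Nat) : Int) = 0 by norm_num] at hA
        rw [hA]
        cases hfd : pvFD cs e 0 with
        | none => simp
        | some p =>
            simp only [Option.elim]
            rw [if_neg (by omega)]
    · rw [pvFirstDigitA, dif_neg hse, pvFD_none_of_ge_e cs e 0 (by omega)]
      simp

theorem pvEvalA_witness : find_digit_group_in_range_py "1a" (-2) 1 = some (-2, -1) := by
  have h : "1a".toList = ['1','a'] := by decide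
  have f0 : pvFirstDigitA ['1','a'] (-2) 1 = -2 := by
    rw [pvFirstDigitA, dif_pos (by norm_num), if_pos ⟨by norm_num, by decide⟩]
  have ed : pvExpandDown ['1','a'] (-2) = -2 := by
    rw [pvExpandDown, dif_neg (fun hc => by exact absurd hc.1 (by norm_num))]
  have eu : pvExpandUp ['1','a'] (-2 + 1) = -1 := by
    rw [show (-2 + 1 : Int) = -1 by norm_num,
      pvExpandUp, dif_neg (fun hc => by exact absurd hc.2 (by decide))]
  simp only [find_digit_group_in_range_py, h, f0, ed, eu]
  norm_num

theorem pvEvalB_witness : find_digit_group_in_range_py_alt "1a" (-2) 1 = some (0, 1) := by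
  have h : "1a".toList = ['1','a'] := by decide
  have s0 : pvScanEnd ['1','a'] 0 = 1 := by
    rw [pvScanEnd, dif_pos ⟨by norm_num, by decide⟩, pvScanEnd,
      dif_neg (fun hc => by exact absurd hc.2 (by decide))]
  have r1 : pvRunsFrom ['1','a'] 1 = [] := by
    rw [pvRunsFrom, dif_pos (by norm_num), dif_neg (by decide), pvRunsFrom, dif_neg (by norm_num)]
  have r0 : pvRunsFrom ['1','a'] 0 = [(0, 1)] := by
    rw [pvRunsFrom, dif_pos (by norm_num), dif_pos (by decide), s0, r1]
    norm_num
  simp only [find_digit_group_in_range_py_alt, h, r0]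
  norm_num

-- ===== VERDICT (by name: the statement is the Claim_ definition above) =====
theorem find_digit_group_in_range_py_spec : Claim_unchanged_find_digit_group_in_range_py := by
  intro name start end_ _ hpre hnd
  exact pv_main name start end_ hpre hnd

theorem find_digit_group_in_range_py_changed : Claim_changed_find_digit_group_in_range_py := by
  unfold Claim_changed_find_digit_group_in_range_py
  exact ⟨by decide, by decide, by decide, pvEvalA_witness, pvEvalB_witness, by decide⟩

theorem find_digit_group_in_range_py_tight : Claim_exact_find_digit_group_in_range_py := by
  intro name start e _ hpre hd
  obtain ⟨hs, j, ⟨hw1, hw2, hw3⟩, hdisj⟩ := hd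
  simp only [find_digit_group_in_range_py, find_digit_group_in_range_py_alt]
  have hjlt : (j : Nat) < name.toList.length := j.isLt
  have hse : start < e := by omega
  have hlen := hpre hse
  have hwd : ∃ j' : Nat, (name.toList.length : Int) + start ≤ (j' : Int) ∧
      (j' : Int) < (name.toList.length : Int) + min e 0 ∧ pvDg name.toList j' = true :=
    ⟨(j : Nat), hw1, hw2, by rw [pvDg_getElem name.toList _ hjlt]; exact hw3⟩
  obtain ⟨jh, hv, hh1, hh2, hh3, hmin⟩ := pvFirstDigitA_neg_hit name.toList e start hlen hs hwd
  have hjh : jh < name.toList.length := by omega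
  rw [hv]
  by_cases hr : (jh : Int) - (name.toList.length : Int) = -1
  · -- A returns none through its -1 sentinel; B finds a run before end
    rw [if_pos hr]
    have hjge : jh ≤ (j : Nat) :=
      hmin (j : Nat) hw1 hw2 (by rw [pvDg_getElem name.toList _ hjlt]; exact hw3)
    have hC : ∃ k : Fin name.toList.length, (k : Int) < e ∧
        (name.toList[(k : Nat)]'k.isLt).isDigit = true := by
      rcases hdisj with h | h
      · exact absurd h (by omega)
      · exact h
    obtain ⟨k, hk1, hk2⟩ := hC
    have hB := pvRuns_find name.toList start e name.toList.length 0 (by omega) (fun _ => Or.inl rfl)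
    rw [show max 0 start.toNat = start.toNat by omega, show start.toNat = 0 by omega] at hB
    rw [hB]
    have hsome := pvFD_isSome_of name.toList e 0
      ⟨(k : Nat), by omega, k.isLt, hk1, by rw [pvDg_getElem name.toList _ k.isLt]; exact hk2⟩
    obtain ⟨p, hp⟩ := Option.isSome_iff_exists.mp hsome
    rw [hp]
    simp
  · -- A returns a span starting at jh - len < -1; B's runs all start at nonnegative positions
    rw [if_neg hr]
    have hneg : (jh : Int) - (name.toList.length : Int) < 0 := by omega
    have hED : pvExpandDown name.toList ((jh : Int) - (name.toList.length : Int)) =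
        (jh : Int) - (name.toList.length : Int) := by
      rw [pvExpandDown, dif_neg (fun hc => absurd hc.1 (by omega))]
    rw [hED]
    intro heq
    cases hfind : (pvRunsFrom name.toList 0).find? (fun r => decide (max r.1 start < min r.2 e)) with
    | none => rw [hfind] at heq; simp at heq
    | some rr =>
        rw [hfind] at heq
        have hmem := List.mem_of_find?_eq_some hfind
        have hnn := pvRunsFrom_fst_nonneg name.toList 0 rr hmem
        have hpair : ((jh : Int) - (name.toList.length : Int),
            pvExpandUp name.toList ((jh : Int) - (name.toList.length : Int) + 1)) = rr :=
          Option.some.inj heq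
        rw [← hpair] at hnn
        have hnn' : (0 : Int) ≤ (jh : Int) - (name.toList.length : Int) := hnn
        omega
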